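-- pv_equiv track=rewrite | github.com/jhsieh731/cs262_wire_protocol | custom_protocol.py | _split_items
-- ===== SOURCE A (Python) =====
-- def _split_items(data, is_dict):
--     """Splits serialized items while handling nested structures."""
--     items, stack, current, in_string = [], [], "", False
--     for char in data:
--         if char == '"':
--             in_string = not in_string  # Toggle string mode
--         elif not in_string:
--             if char in "{[":
--                 stack.append(char)
--             elif char in "}]":
--                 stack.pop()
--             elif char == "," and not stack:
--                 items.append(current.strip())
--                 current = ""
--                 continue
--         current += char
--     if current.strip():
--         items.append(current.strip())
--     return items
-- ===== SOURCE B (Python) =====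
-- def _split_items(data, is_dict):
--     # Two-pass: first find the indices of top-level commas, then slice.
--     def find_comma(s):
--         stack, in_string = [], False
--         for i, ch in enumerate(s):
--             if ch == '"':
--                 in_string = not in_string
--             elif not in_string:
--                 if ch in "{[":
--                     stack.append(ch)
--                 elif ch in "}]":
--                     stack.pop()
--                 elif ch == "," and not stack:
--                     return i
--         return None
--
--     def split_top(s):
--         parts = []
--         while True:
--             i = find_comma(s)
--             if i is None:
--                 parts.append(s)
--                 return parts
--             parts.append(s[:i])
--             s = s[i + 1:]
--
--     raw = split_top(data)
--     items = [seg.strip() for seg in raw[:-1]]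
--     last = raw[-1].strip()
--     if last:
--         items.append(last)
--     return items
-- ===== Notes on version B (the rewrite author's own statement) =====
-- stated objective: alternative
-- what changed: A builds each item incrementally in one accumulator pass (current += char, flushing on top-level commas); B instead makes a scan that only locates the index of the next top-level comma and then slices the segments out of the string, assembling the stripped items in a separate pass over the segment list.
import Mathlib
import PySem

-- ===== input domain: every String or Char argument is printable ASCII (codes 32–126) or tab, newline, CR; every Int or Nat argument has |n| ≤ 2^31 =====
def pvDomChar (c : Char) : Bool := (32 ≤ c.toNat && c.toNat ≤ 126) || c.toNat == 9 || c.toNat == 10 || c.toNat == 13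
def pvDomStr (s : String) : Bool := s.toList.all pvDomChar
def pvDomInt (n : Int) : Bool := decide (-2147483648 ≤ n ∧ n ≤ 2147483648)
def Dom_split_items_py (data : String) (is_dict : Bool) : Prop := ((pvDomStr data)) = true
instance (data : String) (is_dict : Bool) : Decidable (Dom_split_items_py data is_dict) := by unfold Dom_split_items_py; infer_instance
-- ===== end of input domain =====

-- B replaces A's single accumulator pass by a comma-index scan plus slicing (alternative decomposition, same cost).

-- ===== PORT A =====
def pvIsOpen (c : Char) : Bool := c == '{' || c == '['
def pvIsClose (c : Char) : Bool := c == '}' || c == ']'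

-- A's loop, step for step: state (items, stack, current, in_string); on an unbalanced
-- closer Python's stack.pop() raises IndexError (excluded by Pre_); here `stack.tail` stands in.
def pvALoop : List Char → List (List Char) → List Char → List Char → Bool → List (List Char)
  | [], items, _, current, _ =>
      if PySem.Chars.strip current = [] then items else items ++ [PySem.Chars.strip current]
  | c :: cs, items, stack, current, in_string =>
      if c == '"' then pvALoop cs items stack (current ++ [c]) (!in_string)
      else if !in_string then
        if pvIsOpen c then pvALoop cs items (c :: stack) (current ++ [c]) in_string
        else if pvIsClose c then pvALoop cs items stack.tail (current ++ [c]) in_string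
        else if c == ',' && stack.isEmpty then pvALoop cs (items ++ [PySem.Chars.strip current]) stack [] in_string
        else pvALoop cs items stack (current ++ [c]) in_string
      else pvALoop cs items stack (current ++ [c]) in_string

def split_items_py (data : String) (is_dict : Bool) : List String :=
  (pvALoop data.toList [] [] [] false).map (fun l => String.ofList l)

-- ===== PORT B =====
-- Source B's find_comma: index of the first top-level comma (None if there is none);
-- stack.pop() on empty raises in Python (excluded by Pre_), `tail` stands in.
def pvFindComma : List Char → List Char → Bool → Nat → Option Nat
  | [], _, _, _ => none
  | c :: cs, stack, in_string, i =>
      if c == '"' then pvFindComma cs stack (!in_string) (i + 1)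
      else if !in_string then
        if pvIsOpen c then pvFindComma cs (c :: stack) in_string (i + 1)
        else if pvIsClose c then pvFindComma cs stack.tail in_string (i + 1)
        else if c == ',' && stack.isEmpty then some i
        else pvFindComma cs stack in_string (i + 1)
      else pvFindComma cs stack in_string (i + 1)

theorem pvFindComma_nil (st : List Char) (ins : Bool) (i : Nat) :
    pvFindComma [] st ins i = none := rfl

-- Source B's split_top loop: repeatedly slice off s[:i] at the found comma, keep s[i+1:].
def pvSplitTop (s : List Char) (parts : List (List Char)) : List (List Char) :=
  match h : pvFindComma s [] false 0 with
  | none => parts ++ [s]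
  | some i => pvSplitTop (s.drop (i + 1)) (parts ++ [s.take i])
termination_by s.length
decreasing_by
  have hne : s ≠ [] := by intro e; rw [e, pvFindComma_nil] at h; exact absurd h (by simp)
  have : 0 < s.length := List.length_pos_iff.mpr hne
  have h2 : (List.drop (i + 1) s).length = s.length - (i+1) := List.length_drop ..
  omega

def split_items_py_alt (data : String) (is_dict : Bool) : List String :=
  let raw := pvSplitTop data.toList []
  let items := raw.dropLast.map (fun seg => PySem.Chars.strip seg)
  let last := PySem.Chars.strip (raw.getLastD [])
  (if last = [] then items else items ++ [last]).map (fun l => String.ofList l)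

-- ===== PRECONDITION & SPEC =====
-- Pre_ excludes exactly the inputs where Python's stack.pop() raises IndexError (an
-- unbalanced closing bracket outside a string); both A and B raise there.
def pvBalOk : List Char → Bool → Nat → Bool
  | [], _, _ => true
  | c :: cs, in_string, d =>
      if c == '"' then pvBalOk cs (!in_string) d
      else if in_string then pvBalOk cs in_string d
      else if pvIsOpen c then pvBalOk cs in_string (d + 1)
      else if pvIsClose c then decide (0 < d) && pvBalOk cs in_string (d - 1)
      else pvBalOk cs in_string d

def Pre_split_items_py (data : String) (is_dict : Bool) : Prop :=
  pvBalOk data.toList false 0 = true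
instance (data : String) (is_dict : Bool) : Decidable (Pre_split_items_py data is_dict) := by
  unfold Pre_split_items_py; infer_instance

def pvWitness_split_items_py : String × Bool := ("a, [1, 2], \"x,y\"", true)

def Spec_split_items_py (data : String) (is_dict : Bool) (out : List String) : Prop := out = split_items_py_alt data is_dict
instance (data : String) (is_dict : Bool) (out : List String) : Decidable (Spec_split_items_py data is_dict out) := by unfold Spec_split_items_py; infer_instance

-- ===== CLAIM (what is proved, stated in full; the proofs are below) =====
def Claim_equal_split_items_py : Prop := ∀ (data : String) (is_dict : Bool), Dom_split_items_py data is_dict → Pre_split_items_py data is_dict → Spec_split_items_py data is_dict (split_items_py data is_dict)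

-- ===== LEMMAS AND PROOFS =====

-- Proof-side characterisation: the raw top-level segments of the input given a scan state.
def pvConsHead (c : Char) : List (List Char) → List (List Char)
  | [] => [[c]]
  | h :: t => (c :: h) :: t

def pvSegs : List Char → List Char → Bool → List (List Char)
  | [], _, _ => [[]]
  | c :: cs, stack, in_string =>
      if c == '"' then pvConsHead c (pvSegs cs stack (!in_string))
      else if !in_string then
        if pvIsOpen c then pvConsHead c (pvSegs cs (c :: stack) in_string)
        else if pvIsClose c then pvConsHead c (pvSegs cs stack.tail in_string)
        else if c == ',' && stack.isEmpty then [] :: pvSegs cs stack in_string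
        else pvConsHead c (pvSegs cs stack in_string)
      else pvConsHead c (pvSegs cs stack in_string)

def pvPrepend (cur : List Char) : List (List Char) → List (List Char)
  | [] => [cur]
  | h :: t => (cur ++ h) :: t

def pvAssemble (segs : List (List Char)) : List (List Char) :=
  segs.dropLast.map (fun seg => PySem.Chars.strip seg) ++
    (if PySem.Chars.strip (segs.getLastD []) = [] then []
     else [PySem.Chars.strip (segs.getLastD [])])

theorem pvConsHead_ne_nil (c : Char) (l : List (List Char)) : pvConsHead c l ≠ [] := by
  cases l <;> simp [pvConsHead]

theorem pvSegs_ne_nil (cs : List Char) : ∀ st ins, pvSegs cs st ins ≠ [] := by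
  induction cs with
  | nil => intro st ins; simp [pvSegs]
  | cons c cs ih =>
      intro st ins
      simp only [pvSegs]
      split_ifs <;> first | exact pvConsHead_ne_nil _ _ | simp

theorem pvPrepend_consHead (cur : List Char) (c : Char) (l : List (List Char)) :
    pvPrepend cur (pvConsHead c l) = pvPrepend (cur ++ [c]) l := by
  cases l <;> simp [pvPrepend, pvConsHead]

theorem pvPrepend_nil_of_ne (l : List (List Char)) (h : l ≠ []) : pvPrepend [] l = l := by
  cases l with
  | nil => exact absurd rfl h
  | cons a t => simp [pvPrepend]

theorem pvAssemble_cons (x : List Char) (l : List (List Char)) (h : l ≠ []) :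
    pvAssemble (x :: l) = PySem.Chars.strip x :: pvAssemble l := by
  cases l with
  | nil => exact absurd rfl h
  | cons a t => simp [pvAssemble]

-- Main invariant for A's loop.
theorem pvALoop_eq (cs : List Char) :
    ∀ st cur ins items, pvALoop cs items st cur ins =
      items ++ pvAssemble (pvPrepend cur (pvSegs cs st ins)) := by
  induction cs with
  | nil =>
      intro st cur ins items
      simp only [pvALoop, pvSegs, pvPrepend, pvAssemble]
      split_ifs <;> simp_all
  | cons c cs ih =>
      intro st cur ins items
      simp only [pvALoop, pvSegs]
      split_ifs with h1 h2 h3 h4 h5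
      · rw [ih, pvPrepend_consHead]
      · rw [ih, pvPrepend_consHead]
      · rw [ih, pvPrepend_consHead]
      · rw [ih]
        have hne := pvSegs_ne_nil cs st ins
        rw [show pvPrepend cur ([] :: pvSegs cs st ins) = (cur ++ []) :: pvSegs cs st ins from rfl]
        rw [pvAssemble_cons _ _ hne, pvPrepend_nil_of_ne _ hne]
        simp
      · rw [ih, pvPrepend_consHead]
      · rw [ih, pvPrepend_consHead]

theorem pvFindComma_succ (cs : List Char) :
    ∀ st ins i, pvFindComma cs st ins (i + 1) = (pvFindComma cs st ins i).map (· + 1) := by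
  induction cs with
  | nil => intro st ins i; rfl
  | cons c cs ih =>
      intro st ins i
      simp only [pvFindComma]
      split_ifs <;> simp [ih]

-- pvSegs through the first top-level comma.
theorem pvSegs_eq_findComma (cs : List Char) :
    ∀ st ins, pvSegs cs st ins =
      match pvFindComma cs st ins 0 with
      | none => [cs]
      | some i => cs.take i :: pvSegs (cs.drop (i + 1)) [] false := by
  induction cs with
  | nil => intro st ins; rfl
  | cons c cs ih =>
      intro st ins
      simp only [pvSegs, pvFindComma]
      split_ifs with h1 h2 h3 h4 h5
      · rw [ih, pvFindComma_succ cs st (!ins) 0]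
        cases hf : pvFindComma cs st (!ins) 0 <;> simp [hf, pvConsHead, List.take_succ_cons, List.drop_succ_cons]
      · rw [ih, pvFindComma_succ cs (c :: st) ins 0]
        cases hf : pvFindComma cs (c :: st) ins 0 <;> simp [hf, pvConsHead, List.take_succ_cons, List.drop_succ_cons]
      · rw [ih, pvFindComma_succ cs st.tail ins 0]
        cases hf : pvFindComma cs st.tail ins 0 <;> simp [hf, pvConsHead, List.take_succ_cons, List.drop_succ_cons]
      · have hst : st = [] := by
          cases st with
          | nil => rfl
          | cons a t => simp at h5
        have hins : ins = false := by
          cases ins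
          · rfl
          · simp at h2
        subst hst; subst hins
        simp [List.take, List.drop]
      · rw [ih, pvFindComma_succ cs st ins 0]
        cases hf : pvFindComma cs st ins 0 <;> simp [hf, pvConsHead, List.take_succ_cons, List.drop_succ_cons]
      · rw [ih, pvFindComma_succ cs st ins 0]
        cases hf : pvFindComma cs st ins 0 <;> simp [hf, pvConsHead, List.take_succ_cons, List.drop_succ_cons]

theorem pvSplitTop_eq : ∀ (s : List Char) (parts : List (List Char)),
    pvSplitTop s parts = parts ++ pvSegs s [] false := by
  intro s parts
  induction s, parts using pvSplitTop.induct with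
  | case1 s parts h =>
      rw [pvSplitTop]
      split
      · rw [pvSegs_eq_findComma s [] false, h]
      · next j hj => rw [h] at hj; cases hj
  | case2 s parts i h ih =>
      rw [pvSplitTop]
      split
      · next hnone => rw [h] at hnone; cases hnone
      · next j hj =>
          injection (h.symm.trans hj) with hij
          subst hij
          rw [ih, pvSegs_eq_findComma s [] false]
          simp only [h]
          simp

theorem pv_main (data : String) (b1 b2 : Bool) :
    split_items_py data b1 = split_items_py_alt data b2 := by
  unfold split_items_py split_items_py_alt
  rw [pvALoop_eq, pvSplitTop_eq]
  have hne := pvSegs_ne_nil data.toList [] false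
  rw [pvPrepend_nil_of_ne _ hne]
  simp only [List.nil_append, pvAssemble]
  split_ifs <;> simp

-- ===== VERDICT (by name: the statement is the Claim_ definition above) =====
theorem split_items_py_spec : Claim_equal_split_items_py := by
  intro data is_dict _ _
  unfold Spec_split_items_py
  exact pv_main data is_dict is_dict
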